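-- pv_equiv track=rewrite | github.com/vilhess/POT | metric_utils.py | compute_latencies
-- ===== SOURCE A (Python) =====
-- def find_anomaly_periods(actual):
--     periods = []
--     in_anomaly = False
--     start = None
--
--     for i, val in enumerate(actual):
--         if val == 1 and not in_anomaly:
--             start = i
--             in_anomaly = True
--         elif val == 0 and in_anomaly:
--             periods.append((start, i - 1))
--             in_anomaly = False
--
--     if in_anomaly:
--         periods.append((start, len(actual) - 1))
--
--     return periods
--
-- def compute_latencies(actual, predic):
--     assert len(actual)==len(predic), "labels and detections should have the same shape"
--     anomaly_periods = find_anomaly_periods(actual)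
--     latencies = []
--     sizes = []
--
--     for start, end in anomaly_periods:
--         detection_time = next((i for i in range(start, end + 1) if predic[i] == 1), None)
--         latency = detection_time - start if detection_time is not None else None
--         latencies.append(latency)
--         sizes.append(end - start + 1)
--
--     return latencies, sizes
-- ===== SOURCE B (Python) =====
-- def compute_latencies(actual, predic):
--     assert len(actual) == len(predic), "labels and detections should have the same shape"
--     latencies = []
--     sizes = []
--     in_anomaly = False
--     start = None
--     detected = None
--     for i, (a, p) in enumerate(zip(actual, predic)):
--         if in_anomaly and a == 0:
--             latencies.append(detected - start if detected is not None else None)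
--             sizes.append(i - start)
--             in_anomaly = False
--         elif not in_anomaly and a == 1:
--             start = i
--             detected = None
--             in_anomaly = True
--         if in_anomaly and detected is None and p == 1:
--             detected = i
--     if in_anomaly:
--         latencies.append(detected - start if detected is not None else None)
--         sizes.append(len(actual) - start)
--     return latencies, sizes
-- ===== Notes on version B (the rewrite author's own statement) =====
-- stated objective: simpler
-- what changed: B inlines find_anomaly_periods and the per-period detection search into one single pass over the paired labels/predictions, tracking in_anomaly, the period start and the first detection index, instead of building a period list and re-scanning predic for each period.
import Mathlib
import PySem

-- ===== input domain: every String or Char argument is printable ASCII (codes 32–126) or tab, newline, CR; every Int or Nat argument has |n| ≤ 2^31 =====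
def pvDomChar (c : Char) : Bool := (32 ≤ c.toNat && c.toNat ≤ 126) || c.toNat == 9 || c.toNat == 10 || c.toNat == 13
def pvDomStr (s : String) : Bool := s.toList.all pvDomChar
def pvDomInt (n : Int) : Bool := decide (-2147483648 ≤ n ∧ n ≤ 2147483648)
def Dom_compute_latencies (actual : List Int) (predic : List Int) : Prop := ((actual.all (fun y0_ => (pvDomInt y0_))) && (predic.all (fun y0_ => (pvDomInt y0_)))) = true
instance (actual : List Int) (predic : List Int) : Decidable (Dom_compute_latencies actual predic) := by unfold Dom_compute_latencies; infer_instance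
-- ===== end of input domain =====

-- B inlines the two helpers into one single pass that tracks the running period
-- start and first detection; objective: simpler (one traversal, no period list).
-- Equivalence is about the return value; neither version mutates its arguments.

-- ===== PORT A =====
-- step of find_anomaly_periods' loop: state = (periods, in_anomaly, start)
def fapStep (st : List (Int × Int) × Bool × Option Int) (iv : Int × Int) :
    List (Int × Int) × Bool × Option Int :=
  let (periods, in_anomaly, start) := st
  let (i, val) := iv
  if val == 1 && !in_anomaly then (periods, true, some i)
  else if val == 0 && in_anomaly then (periods ++ [(start.getD 0, i - 1)], false, start)
  else (periods, in_anomaly, start)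

def find_anomaly_periods (actual : List Int) : List (Int × Int) :=
  let st := (PySem.List.enumerate actual 0).foldl fapStep ([], false, none)
  if st.2.1 then st.1 ++ [(st.2.2.getD 0, (actual.length : Int) - 1)] else st.1

-- body of compute_latencies' loop over periods
def clStep (predic : List Int) (acc : List (Option Int) × List Int) (p : Int × Int) :
    List (Option Int) × List Int :=
  let detection_time :=
    (PySem.List.pyRange p.1 (p.2 + 1) 1).find? (fun i => PySem.List.pyGet? predic i == some 1)
  (acc.1 ++ [detection_time.map (fun t => t - p.1)], acc.2 ++ [p.2 - p.1 + 1])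

def compute_latencies (actual : List Int) (predic : List Int) :
    List (Option Int) × List Int :=
  (find_anomaly_periods actual).foldl (clStep predic) ([], [])

-- ===== PORT B =====
-- single-pass state = (latencies, sizes, in_anomaly, start, detected)
def altStep (st : List (Option Int) × List Int × Bool × Option Int × Option Int)
    (iap : Int × Int × Int) :
    List (Option Int) × List Int × Bool × Option Int × Option Int :=
  let (lats, sizes, ina, start, det) := st
  let (i, a, p) := iap
  let (lats, sizes, ina, start, det) :=
    if ina && a == 0 then
      (lats ++ [det.map (fun t => t - start.getD 0)], sizes ++ [i - start.getD 0], false, start, det)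
    else if !ina && a == 1 then (lats, sizes, true, some i, none)
    else (lats, sizes, ina, start, det)
  let det := if ina && det == none && p == 1 then some i else det
  (lats, sizes, ina, start, det)

def compute_latencies_alt (actual : List Int) (predic : List Int) :
    List (Option Int) × List Int :=
  let st := (PySem.List.enumerate (actual.zip predic) 0).foldl altStep ([], [], false, none, none)
  let (lats, sizes, ina, start, det) := st
  if ina then
    (lats ++ [det.map (fun t => t - start.getD 0)], sizes ++ [(actual.length : Int) - start.getD 0])
  else (lats, sizes)

-- ===== PRECONDITION & SPEC =====
-- A's assert raises AssertionError when the lengths differ; exactly that is excluded.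
def Pre_compute_latencies (actual : List Int) (predic : List Int) : Prop :=
  actual.length = predic.length
instance (actual : List Int) (predic : List Int) :
    Decidable (Pre_compute_latencies actual predic) := by
  unfold Pre_compute_latencies; infer_instance

def pvWitness_compute_latencies : List Int × List Int := ([0, 1, 1, 0, 1], [0, 0, 1, 0, 0])

def Spec_compute_latencies (actual : List Int) (predic : List Int)
    (out : List (Option Int) × List Int) : Prop := out = compute_latencies_alt actual predic
instance (actual : List Int) (predic : List Int) (out : List (Option Int) × List Int) :
    Decidable (Spec_compute_latencies actual predic out) := by
  unfold Spec_compute_latencies; infer_instance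

-- ===== CLAIM (what is proved, stated in full; the proofs are below) =====
def Claim_equal_compute_latencies : Prop := ∀ (actual : List Int) (predic : List Int), Dom_compute_latencies actual predic → Pre_compute_latencies actual predic → Spec_compute_latencies actual predic (compute_latencies actual predic)

-- ===== LEMMAS AND PROOFS =====

-- latency and size of one period, as A's loop computes them
def latOf (predic : List Int) (p : Int × Int) : Option Int :=
  ((PySem.List.pyRange p.1 (p.2 + 1) 1).find?
    (fun i => PySem.List.pyGet? predic i == some 1)).map (fun t => t - p.1)

def szOf (p : Int × Int) : Int := p.2 - p.1 + 1

lemma clStep_foldl (predic : List Int) (P : List (Int × Int)) :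
    ∀ l1 l2, P.foldl (clStep predic) (l1, l2) =
      (l1 ++ P.map (latOf predic), l2 ++ P.map szOf) := by
  induction P with
  | nil => simp
  | cons p P ih =>
      intro l1 l2
      simp [List.foldl, clStep, ih, latOf, szOf]

-- coupling invariant between A's period-building state and B's single-pass state
def CpInv (predic : List Int) (n : Nat)
    (stA : List (Int × Int) × Bool × Option Int)
    (stB : List (Option Int) × List Int × Bool × Option Int × Option Int) : Prop :=
  stB.1 = stA.1.map (latOf predic) ∧
  stB.2.1 = stA.1.map szOf ∧
  stB.2.2.1 = stA.2.1 ∧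
  stB.2.2.2.1 = stA.2.2 ∧
  (stA.2.1 = true → ∃ st0 : Int, stA.2.2 = some st0 ∧ 0 ≤ st0 ∧ st0 ≤ (n : Int) ∧
    stB.2.2.2.2 = (PySem.List.pyRange st0 (n : Int) 1).find?
      (fun i => PySem.List.pyGet? predic i == some 1))


lemma find?_singleton_cond (p : Int → Bool) (x : Int) :
    List.find? p [x] = if p x then some x else none := by
  by_cases h : p x <;> simp [List.find?, h]

lemma inv_step (predic : List Int) (n : Nat) (hn : n < predic.length)
    (a : Int) (P : List (Int × Int)) (b : Bool) (s : Option Int)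
    (L : List (Option Int)) (S : List Int) (b2 : Bool) (s2 d : Option Int)
    (h : CpInv predic n (P, b, s) (L, S, b2, s2, d)) :
    CpInv predic (n + 1) (fapStep (P, b, s) ((n : Int), a))
      (altStep (L, S, b2, s2, d) ((n : Int), a, predic[n])) := by
  obtain ⟨hL, hS, hb, hs, hdet⟩ := h
  simp only at hL hS hb hs hdet
  subst hL hS hb hs
  have hget : PySem.List.pyGet? predic (n : Int) = some predic[n] := by
    simp [PySem.List.pyGet?_natCast, List.getElem?_eq_getElem hn]
  by_cases hbt : b2 = true
  · subst hbt
    obtain ⟨st0, hs0, h0, hle, hd⟩ := hdet rfl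
    subst hs0
    have hsplit : PySem.List.pyRange st0 ((n : Int) + 1) 1
        = PySem.List.pyRange st0 (n : Int) 1 ++ [(n : Int)] :=
      PySem.List.pyRange_one_succ_right hle
    by_cases ha0 : a = 0
    · subst ha0
      simp only [fapStep, altStep, CpInv]
      refine ⟨?_, ?_, rfl, rfl, ?_⟩
      · simp [latOf, hd, show ((n : Int) - 1 + 1) = (n : Int) by ring]
      · simp [szOf, show ((n : Int) - 1 - st0 + 1) = (n : Int) - st0 by ring]
      · simp
    · simp only [fapStep, altStep, CpInv]
      have hne0 : (a == 0) = false := by simp [ha0]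
      simp only [hne0, Bool.not_true, Bool.and_false, Bool.false_and, if_neg Bool.false_ne_true]
      refine ⟨by simp, by simp, by simp, by simp, ?_⟩
      intro _
      refine ⟨st0, by simp, h0, by push_cast; omega, ?_⟩
      push_cast
      rw [hsplit, List.find?_append, find?_singleton_cond, hget]
      cases d with
      | none => by_cases hp : predic[n] = 1 <;> simp [hp, ← hd]
      | some x => simp [← hd]
  · rw [Bool.not_eq_true] at hbt
    subst hbt
    by_cases ha1 : a = 1
    · subst ha1
      simp only [fapStep, altStep, CpInv]
      refine ⟨by simp, by simp, by simp, by simp, ?_⟩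
      intro _
      refine ⟨(n : Int), by simp, by positivity, by push_cast; omega, ?_⟩
      push_cast
      rw [PySem.List.pyRange_one_succ_right (le_refl (n : Int)),
        PySem.List.pyRange_one_eq_nil (le_refl (n : Int)), List.nil_append,
        find?_singleton_cond, hget]
      by_cases hp : predic[n] = 1 <;> simp [hp]
    · have hne1 : (a == 1) = false := by simp [ha1]
      simp only [fapStep, altStep, CpInv, hne1]
      simp

lemma inv_fold (predic : List Int) :
    ∀ (ta : List Int) (n : Nat), n + ta.length = predic.length →
    ∀ (stA : List (Int × Int) × Bool × Option Int)
      (stB : List (Option Int) × List Int × Bool × Option Int × Option Int),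
    CpInv predic n stA stB →
    CpInv predic (n + ta.length)
      ((PySem.List.enumerate ta (n : Int)).foldl fapStep stA)
      ((PySem.List.enumerate (ta.zip (predic.drop n)) (n : Int)).foldl altStep stB) := by
  intro ta
  induction ta with
  | nil => intro n _ stA stB h; simpa [PySem.List.enumerate] using h
  | cons a ta ih =>
      intro n hlen stA stB h
      have hn : n < predic.length := by simp at hlen; omega
      rw [List.drop_eq_getElem_cons hn]
      obtain ⟨P, b, s⟩ := stA
      obtain ⟨L, S, b2, s2, d⟩ := stB
      have hstep := inv_step predic n hn a P b s L S b2 s2 d h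
      have hrec := ih (n + 1) (by simp at hlen ⊢; omega) _ _ hstep
      simp only [PySem.List.enumerate_cons, List.zip_cons_cons, List.foldl_cons]
      have hcast : ((n : Int) + 1) = ((n + 1 : Nat) : Int) := by push_cast; ring
      rw [hcast]
      have : n + (a :: ta).length = (n + 1) + ta.length := by simp; omega
      rw [this]
      exact hrec

theorem main_eq (actual predic : List Int) (h : actual.length = predic.length) :
    compute_latencies actual predic = compute_latencies_alt actual predic := by
  have hinv := inv_fold predic actual 0 (by omega) ([], false, none) ([], [], false, none, none)
    (by refine ⟨rfl, rfl, rfl, rfl, ?_⟩; intro hc; simp at hc)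
  simp only [List.drop_zero, Nat.cast_zero, Nat.zero_add] at hinv
  unfold compute_latencies find_anomaly_periods compute_latencies_alt
  set stA := (PySem.List.enumerate actual 0).foldl fapStep ([], false, none) with hA
  set stB := (PySem.List.enumerate (actual.zip predic) 0).foldl altStep ([], [], false, none, none) with hB
  obtain ⟨P, b, s⟩ := stA
  obtain ⟨L, S, b2, s2, d⟩ := stB
  obtain ⟨hL, hS, hb, hs, hdet⟩ := hinv
  simp only at hL hS hb hs hdet
  subst hL hS hb hs
  by_cases hbt : b2 = true
  · subst hbt
    obtain ⟨st0, hs0, h0, hle, hd⟩ := hdet rfl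
    have hNlen : (actual.length : Int) = (predic.length : Int) := by exact_mod_cast h
    subst hs0
    rw [h] at hd
    simp only [if_pos trivial, clStep_foldl, List.map_append, List.map_cons, List.map_nil]
    simp [latOf, szOf, hd, h, show ((predic.length : Int) - 1 + 1) = (predic.length : Int) by ring,
      show ((predic.length : Int) - 1 - st0 + 1) = (predic.length : Int) - st0 by ring]
  · rw [Bool.not_eq_true] at hbt
    subst hbt
    simp [clStep_foldl]

-- ===== VERDICT (by name: the statement is the Claim_ definition above) =====
theorem compute_latencies_spec : Claim_equal_compute_latencies := by
  intro actual predic _ hpre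
  exact main_eq actual predic hpre
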